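-- pv_equiv track=rewrite | github.com/schamori/foundation_model- | src/end_tasks/phases/dataloader.py | _match_name_to_autosave
-- ===== SOURCE A (Python) =====
-- def _video_id(name: str) -> str:
--     """Extract the short video identifier (e.g. '5ALA_003', 'MVD_004', 'RS-036').
--
--     Uses the first two underscore-separated parts if the second part looks like
--     a number/code (<=5 chars), otherwise just the part before the first
--     underscore or hyphen-separated prefix.
--     """
--     parts = name.split("_", 2)
--     if len(parts) >= 2 and len(parts[1]) <= 5:
--         return f"{parts[0]}_{parts[1]}"
--     # Fall back to prefix before first underscore (or whole name)
--     idx = name.find("_")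
--     return name[:idx] if idx > 0 else name
--
-- def _match_name_to_autosave(
--     name: str,
--     autosave_dirs: list[str],
-- ) -> str | None:
--     """Match a phase-label video name to an autosave directory name.
--
--     Tries: exact → video-id prefix match → contains.
--     """
--     name_lower = name.lower()
--     vid_id = _video_id(name).lower()
--
--     # Exact match
--     for d in autosave_dirs:
--         if d.lower() == name_lower:
--             return d
--
--     # Video-ID prefix match (5ALA_003 matches 5ALA_003_..., not 5ALA_006_...)
--     for d in autosave_dirs:
--         dl = d.lower()
--         if dl == vid_id or dl.startswith(vid_id + "_") or dl.startswith(vid_id + "-"):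
--             return d
--
--     # Substring match
--     for d in autosave_dirs:
--         if name_lower in d.lower():
--             return d
--
--     return None
-- ===== SOURCE B (Python) =====
-- def _video_id(name: str) -> str:
--     parts = name.split("_", 2)
--     if len(parts) >= 2 and len(parts[1]) <= 5:
--         return f"{parts[0]}_{parts[1]}"
--     idx = name.find("_")
--     return name[:idx] if idx > 0 else name
--
-- def _match_name_to_autosave(name, autosave_dirs):
--     # Single pass: give each dir a priority (0 exact, 1 video-id prefix,
--     # 2 substring) and keep the first dir of the lowest priority seen.
--     name_lower = name.lower()
--     vid_id = _video_id(name).lower()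
--     best = None  # (priority, dir)
--     for d in autosave_dirs:
--         dl = d.lower()
--         if dl == name_lower:
--             p = 0
--         elif dl == vid_id or dl.startswith(vid_id + "_") or dl.startswith(vid_id + "-"):
--             p = 1
--         elif name_lower in dl:
--             p = 2
--         else:
--             continue
--         if best is None or p < best[0]:
--             best = (p, d)
--     return best[1] if best is not None else None
-- ===== Notes on version B (the rewrite author's own statement) =====
-- stated objective: alternative
-- what changed: Replaces A's three sequential scans (exact, video-id prefix, substring) by a single pass that assigns each dir a priority 0/1/2 and keeps the first dir with the strictly lowest priority, lowercasing each dir once instead of up to three times.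
import Mathlib
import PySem

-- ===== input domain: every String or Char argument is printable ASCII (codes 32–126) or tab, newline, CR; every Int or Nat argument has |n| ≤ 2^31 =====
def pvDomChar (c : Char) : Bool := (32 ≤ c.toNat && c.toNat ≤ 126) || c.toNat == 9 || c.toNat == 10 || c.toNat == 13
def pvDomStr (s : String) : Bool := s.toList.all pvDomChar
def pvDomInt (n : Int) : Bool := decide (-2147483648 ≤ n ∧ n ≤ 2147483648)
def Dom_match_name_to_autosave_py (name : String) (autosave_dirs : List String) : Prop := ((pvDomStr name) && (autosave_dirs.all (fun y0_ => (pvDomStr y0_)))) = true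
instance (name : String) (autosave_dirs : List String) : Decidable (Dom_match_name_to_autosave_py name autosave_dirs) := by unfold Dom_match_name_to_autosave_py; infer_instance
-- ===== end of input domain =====

-- B replaces A's three sequential scans by one pass keeping the first dir of lowest priority (0 exact, 1 video-id prefix, 2 substring); alternative decomposition, same results.


-- ===== PORT A =====
-- shared module helper _video_id (used by both Pythons)
def videoId_py (name : String) : String :=
  match PySem.Str.splitMax? name "_" 2 with
  | some parts =>
    if parts.length ≥ 2 ∧ PySem.Str.len (PySem.List.pyGetD parts 1 "") ≤ 5 then
      PySem.List.pyGetD parts 0 "" ++ "_" ++ PySem.List.pyGetD parts 1 ""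
    else
      let idx := PySem.Str.find name "_"
      if idx > 0 then PySem.Str.slice name none (some idx) else name
  | none => name  -- unreachable: separator "_" is nonempty

def match_name_to_autosave_py (name : String) (autosave_dirs : List String) : Option String :=
  let name_lower := PySem.Str.lower name
  let vid_id := PySem.Str.lower (videoId_py name)
  -- exact match
  match autosave_dirs.find? (fun d => PySem.Str.lower d == name_lower) with
  | some d => some d
  | none =>
    -- video-ID prefix match
    match autosave_dirs.find? (fun d =>
        let dl := PySem.Str.lower d
        dl == vid_id || PySem.Str.startswith dl (vid_id ++ "_") || PySem.Str.startswith dl (vid_id ++ "-")) with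
    | some d => some d
    | none =>
      -- substring match
      match autosave_dirs.find? (fun d => PySem.Str.isIn name_lower (PySem.Str.lower d)) with
      | some d => some d
      | none => none

-- ===== PORT B =====
-- priority of a dir: 0 exact, 1 video-id prefix, 2 substring, none = no match
def pvPrio (name_lower vid_id d : String) : Option Nat :=
  let dl := PySem.Str.lower d
  if dl == name_lower then some 0
  else if dl == vid_id || PySem.Str.startswith dl (vid_id ++ "_") || PySem.Str.startswith dl (vid_id ++ "-") then some 1
  else if PySem.Str.isIn name_lower dl then some 2
  else none

-- the single loop of Source B, carrying the best (priority, dir) seen so far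
def pvGo (name_lower vid_id : String) : List String → Option (Nat × String) → Option (Nat × String)
  | [], best => best
  | d :: rest, best =>
    let best' :=
      match pvPrio name_lower vid_id d, best with
      | none, b => b
      | some p, none => some (p, d)
      | some p, some (q, e) => if p < q then (p, d) else (q, e)
    pvGo name_lower vid_id rest best'

def match_name_to_autosave_py_alt (name : String) (autosave_dirs : List String) : Option String :=
  let name_lower := PySem.Str.lower name
  let vid_id := PySem.Str.lower (videoId_py name)
  (pvGo name_lower vid_id autosave_dirs none).map (·.2)

-- ===== PRECONDITION & SPEC =====
def Spec_match_name_to_autosave_py (name : String) (autosave_dirs : List String) (out : Option String) : Prop := out = match_name_to_autosave_py_alt name autosave_dirs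
instance (name : String) (autosave_dirs : List String) (out : Option String) : Decidable (Spec_match_name_to_autosave_py name autosave_dirs out) := by unfold Spec_match_name_to_autosave_py; infer_instance

-- ===== CLAIM (what is proved, stated in full; the proofs are below) =====
def Claim_equal_match_name_to_autosave_py : Prop := ∀ (name : String) (autosave_dirs : List String), Dom_match_name_to_autosave_py name autosave_dirs → Spec_match_name_to_autosave_py name autosave_dirs (match_name_to_autosave_py name autosave_dirs)

-- ===== LEMMAS AND PROOFS =====

-- left-biased merge of two optional (priority, dir) candidates
def pvMerge (a b : Option (Nat × String)) : Option (Nat × String) :=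
  match a, b with
  | none, b => b
  | some a, none => some a
  | some (q, e), some (p, d) => if p < q then (p, d) else (q, e)

-- the three-level find? chain, phrased through priorities
def pvChain (nl vid : String) (l : List String) : Option (Nat × String) :=
  match l.find? (fun d => pvPrio nl vid d == some 0) with
  | some d => some (0, d)
  | none =>
    match l.find? (fun d => pvPrio nl vid d == some 1) with
    | some d => some (1, d)
    | none =>
      match l.find? (fun d => pvPrio nl vid d == some 2) with
      | some d => some (2, d)
      | none => none

theorem pvMerge_assoc (a b c : Option (Nat × String)) :
    pvMerge (pvMerge a b) c = pvMerge a (pvMerge b c) := by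
  rcases a with _ | ⟨q, e⟩ <;> rcases b with _ | ⟨p, d⟩ <;> rcases c with _ | ⟨r, f⟩ <;>
    simp only [pvMerge] <;> split_ifs <;> simp_all [pvMerge] <;> (try split_ifs) <;> first | rfl | omega | (intros; exfalso; omega)

theorem pvStep (nl vid d : String) (acc : Option (Nat × String)) :
    (match pvPrio nl vid d, acc with
      | none, b => b
      | some p, none => some (p, d)
      | some p, some (q, e) => if p < q then (p, d) else (q, e))
    = pvMerge acc ((pvPrio nl vid d).map (fun p => (p, d))) := by
  rcases h : pvPrio nl vid d with _ | p <;> rcases acc with _ | ⟨q, e⟩ <;> simp [pvMerge]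

theorem pvGo_cons (nl vid d : String) (t : List String) (acc : Option (Nat × String)) :
    pvGo nl vid (d :: t) acc =
      pvGo nl vid t (pvMerge acc ((pvPrio nl vid d).map (fun p => (p, d)))) := by
  show pvGo nl vid t (match pvPrio nl vid d, acc with
      | none, b => b
      | some p, none => some (p, d)
      | some p, some (q, e) => if p < q then (p, d) else (q, e)) = _
  rw [pvStep]

theorem pvPrio_cases (nl vid d : String) :
    pvPrio nl vid d = none ∨ pvPrio nl vid d = some 0 ∨
    pvPrio nl vid d = some 1 ∨ pvPrio nl vid d = some 2 := by
  simp only [pvPrio]; split_ifs <;> simp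

theorem pvChain_cons (nl vid d : String) (t : List String) :
    pvChain nl vid (d :: t) =
      pvMerge ((pvPrio nl vid d).map (fun p => (p, d))) (pvChain nl vid t) := by
  rcases pvPrio_cases nl vid d with h | h | h | h <;>
    · unfold pvChain
      simp only [List.find?_cons, h, Option.map_some, Option.map_none]
      rcases h0 : t.find? (fun x => pvPrio nl vid x == some 0) with _ | d0 <;>
        rcases h1 : t.find? (fun x => pvPrio nl vid x == some 1) with _ | d1 <;>
          rcases h2 : t.find? (fun x => pvPrio nl vid x == some 2) with _ | d2 <;>
            simp [pvMerge, h0, h1, h2]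

theorem pvGo_eq_merge (nl vid : String) (l : List String) :
    ∀ acc, pvGo nl vid l acc = pvMerge acc (pvChain nl vid l) := by
  induction l with
  | nil =>
    intro acc
    have h : pvChain nl vid [] = none := by unfold pvChain; simp
    rw [h]; rcases acc with _ | ⟨q, e⟩ <;> rfl
  | cons d t ih =>
    intro acc
    rw [pvGo_cons, ih, pvChain_cons, ← pvMerge_assoc]

theorem pv_find?_congr {α : Type} (l : List α) (p q : α → Bool)
    (h : ∀ x ∈ l, p x = q x) : l.find? p = l.find? q := by
  induction l with
  | nil => rfl
  | cons a t ih =>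
    simp only [List.find?_cons, h a (by simp)]
    split <;> [rfl; exact ih (fun x hx => h x (by simp [hx]))]

-- the three raw predicates of port A
def pvP0 (nl : String) (d : String) : Bool := PySem.Str.lower d == nl
def pvP1 (vid : String) (d : String) : Bool :=
  let dl := PySem.Str.lower d
  dl == vid || PySem.Str.startswith dl (vid ++ "_") || PySem.Str.startswith dl (vid ++ "-")
def pvP2 (nl : String) (d : String) : Bool := PySem.Str.isIn nl (PySem.Str.lower d)

theorem pvPrio_zero_iff (nl vid d : String) :
    (pvPrio nl vid d == some 0) = pvP0 nl d := by
  simp only [pvPrio, pvP0]; split_ifs with h1 h2 h3 <;> simp_all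

theorem pvPrio_one_eq (nl vid d : String) (h0 : pvP0 nl d = false) :
    (pvPrio nl vid d == some 1) = pvP1 vid d := by
  simp only [pvP0] at h0; simp only [pvPrio, pvP1]; split_ifs with h1 h2 h3 <;> simp_all

theorem pvPrio_two_eq (nl vid d : String) (h0 : pvP0 nl d = false) (h1 : pvP1 vid d = false) :
    (pvPrio nl vid d == some 2) = pvP2 nl d := by
  simp only [pvP0] at h0; simp only [pvP1] at h1; simp only [pvPrio, pvP2]; split_ifs with g1 g2 g3 <;> simp_all

theorem pv_main (nl vid : String) (dirs : List String) :
    (match dirs.find? (fun d => PySem.Str.lower d == nl) with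
     | some d => some d
     | none =>
       match dirs.find? (fun d =>
           let dl := PySem.Str.lower d
           dl == vid || PySem.Str.startswith dl (vid ++ "_") || PySem.Str.startswith dl (vid ++ "-")) with
       | some d => some d
       | none =>
         match dirs.find? (fun d => PySem.Str.isIn nl (PySem.Str.lower d)) with
         | some d => some d
         | none => none) = (pvGo nl vid dirs none).map (·.2) := by
  rw [show (fun d => PySem.Str.lower d == nl) = pvP0 nl from rfl,
      show (fun d =>
          let dl := PySem.Str.lower d
          dl == vid || PySem.Str.startswith dl (vid ++ "_") || PySem.Str.startswith dl (vid ++ "-")) = pvP1 vid from rfl,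
      show (fun d => PySem.Str.isIn nl (PySem.Str.lower d)) = pvP2 nl from rfl,
      pvGo_eq_merge]
  have e0 : dirs.find? (fun d => pvPrio nl vid d == some 0) = dirs.find? (pvP0 nl) :=
    pv_find?_congr _ _ _ (fun x _ => pvPrio_zero_iff nl vid x)
  unfold pvChain
  rw [e0]
  rcases h0 : dirs.find? (pvP0 nl) with _ | d0
  · have all0 : ∀ x ∈ dirs, pvP0 nl x = false := fun x hx => Bool.eq_false_iff.mpr (fun hc => List.find?_eq_none.mp h0 x hx hc)
    have e1 : dirs.find? (fun d => pvPrio nl vid d == some 1) = dirs.find? (pvP1 vid) :=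
      pv_find?_congr _ _ _ (fun x hx => pvPrio_one_eq nl vid x (all0 x hx))
    rw [e1]
    rcases h1 : dirs.find? (pvP1 vid) with _ | d1
    · have all1 : ∀ x ∈ dirs, pvP1 vid x = false := fun x hx => Bool.eq_false_iff.mpr (fun hc => List.find?_eq_none.mp h1 x hx hc)
      have e2 : dirs.find? (fun d => pvPrio nl vid d == some 2) = dirs.find? (pvP2 nl) :=
        pv_find?_congr _ _ _ (fun x hx => pvPrio_two_eq nl vid x (all0 x hx) (all1 x hx))
      rw [e2]
      rcases h2 : dirs.find? (pvP2 nl) with _ | d2 <;>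
        simp only [h0, h1, h2, pvMerge, Option.map_some, Option.map_none]
    · simp only [h0, h1, pvMerge, Option.map_some]
  · simp only [h0, pvMerge, Option.map_some]

-- ===== VERDICT (by name: the statement is the Claim_ definition above) =====
theorem match_name_to_autosave_py_spec : Claim_equal_match_name_to_autosave_py := by
  intro name dirs _
  exact pv_main (PySem.Str.lower name) (PySem.Str.lower (videoId_py name)) dirs
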